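-- pv_equiv track=rewrite | github.com/Charmstok/sarathi-serve | sarathi/utils/prompt_utils.py | _compute_group_sample_counts
-- ===== SOURCE A (Python) =====
-- import math
-- from typing import Any, Callable, Dict, List, Optional, Sequence, Tuple, Union
--
-- def _normalize_short_long_ratio(short_long_ratio: Tuple[int, int]) -> Tuple[int, int]:
--     if len(short_long_ratio) != 2:
--         raise ValueError(
--             "short_long_ratio 必须是长度为 2 的二元组，例如 (1, 1) 或 (3, 7)。"
--         )
--
--     short_ratio = int(short_long_ratio[0])
--     long_ratio = int(short_long_ratio[1])
--     if short_ratio <= 0 or long_ratio <= 0: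
--         raise ValueError(
--             "short_long_ratio 中的两个值都必须 > 0，"
--             f"got {short_long_ratio}"
--         )
--
--     gcd_value = math.gcd(short_ratio, long_ratio)
--     return short_ratio // gcd_value, long_ratio // gcd_value
--
-- def _compute_group_sample_counts(
--     prompt_num: int,
--     short_long_ratio: Tuple[int, int],
-- ) -> Tuple[int, int]:
--     short_ratio, long_ratio = _normalize_short_long_ratio(short_long_ratio)
--     total_ratio = short_ratio + long_ratio
--
--     short_target = prompt_num * short_ratio / total_ratio
--     long_target = prompt_num * long_ratio / total_ratio
--
--     short_count = math.floor(short_target)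
--     long_count = math.floor(long_target)
--     remaining = prompt_num - short_count - long_count
--
--     fractional_parts = [
--         ("short", short_target - short_count),
--         ("long", long_target - long_count),
--     ]
--     fractional_parts.sort(key=lambda item: (-item[1], item[0]))
--
--     for idx in range(remaining):
--         if fractional_parts[idx % 2][0] == "short":
--             short_count += 1
--         else:
--             long_count += 1
--
--     return short_count, long_count
-- ===== SOURCE B (Python) =====
-- import math
-- from typing import Tuple
--
--
-- def _normalize_short_long_ratio(short_long_ratio: Tuple[int, int]) -> Tuple[int, int]:
--     if len(short_long_ratio) != 2:
--         raise ValueError(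
--             "short_long_ratio 必须是长度为 2 的二元组，例如 (1, 1) 或 (3, 7)。"
--         )
--
--     short_ratio = int(short_long_ratio[0])
--     long_ratio = int(short_long_ratio[1])
--     if short_ratio <= 0 or long_ratio <= 0:
--         raise ValueError(
--             "short_long_ratio 中的两个值都必须 > 0，"
--             f"got {short_long_ratio}"
--         )
--
--     gcd_value = math.gcd(short_ratio, long_ratio)
--     return short_ratio // gcd_value, long_ratio // gcd_value
--
--
-- def _targets(prompt_num: int, short_long_ratio: Tuple[int, int]) -> Tuple[float, float]:
--     short_ratio, long_ratio = _normalize_short_long_ratio(short_long_ratio)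
--     total = short_ratio + long_ratio
--     return prompt_num * short_ratio / total, prompt_num * long_ratio / total
--
--
-- def _compute_group_sample_counts(
--     prompt_num: int,
--     short_long_ratio: Tuple[int, int],
-- ) -> Tuple[int, int]:
--     short_target, long_target = _targets(prompt_num, short_long_ratio)
--     base_short = math.floor(short_target)
--     base_long = math.floor(long_target)
--     remaining = prompt_num - base_short - base_long
--     if remaining <= 0:
--         return base_short, base_long
--
--     # Alternating distribution in closed form: the group with the larger
--     # fractional part leads (a tie goes to 'long', the lexicographic tie-break
--     # on the names), the leader gets ceil(remaining/2), the other the rest.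
--     lead = (remaining + 1) // 2
--     if short_target - base_short > long_target - base_long:
--         return base_short + lead, base_long + (remaining - lead)
--     return base_short + (remaining - lead), base_long + lead
-- ===== Notes on version B (the rewrite author's own statement) =====
-- stated objective: simpler
-- what changed: B keeps the exact float targets and floors but replaces A's build-and-sort of a 2-element list plus the alternating for-loop by a direct comparison of the two fractional parts (tie to 'long') and a closed-form ceil/floor split of the remainder, with the target computation factored into its own helper.
import Mathlib
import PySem

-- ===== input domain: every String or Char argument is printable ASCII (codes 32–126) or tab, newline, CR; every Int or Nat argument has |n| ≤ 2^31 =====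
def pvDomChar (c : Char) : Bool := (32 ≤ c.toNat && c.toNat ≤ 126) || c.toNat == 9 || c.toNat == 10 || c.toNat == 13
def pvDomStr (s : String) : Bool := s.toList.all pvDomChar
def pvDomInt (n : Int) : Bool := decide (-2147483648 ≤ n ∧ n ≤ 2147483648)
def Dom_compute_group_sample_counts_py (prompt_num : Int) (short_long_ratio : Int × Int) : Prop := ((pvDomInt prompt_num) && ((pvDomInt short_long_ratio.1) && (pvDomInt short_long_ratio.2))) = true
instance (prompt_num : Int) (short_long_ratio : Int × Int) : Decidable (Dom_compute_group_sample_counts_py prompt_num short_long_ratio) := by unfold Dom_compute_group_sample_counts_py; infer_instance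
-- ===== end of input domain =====

-- B replaces A's sort-a-2-element-list-and-alternate loop by a direct fractional-part
-- comparison and a closed-form ceil/floor split of the remainder (objective: simpler).

-- ===== SHARED FLOAT SEMANTICS (both Pythons perform the identical float operations) =====
-- A Python float value is represented exactly as a pair (m, e) meaning the rational m * 2^e.
-- pvRNdiv a q sh: floor and remainder of a*2^sh / q (sh may be negative), with the divisor used.
def pvRNdiv (a q sh : Int) : Int × Int × Int :=
  if 0 ≤ sh then
    let n := a * 2 ^ sh.toNat
    (Int.ediv n q, Int.emod n q, q)
  else
    let d := q * 2 ^ (-sh).toNat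
    (Int.ediv a d, Int.emod a d, d)

-- pvRN p q = the IEEE-754 binary64 value of Python's p / q (q > 0, result in normal range,
-- as it always is here): round-to-nearest, ties-to-even, 53-bit significand.  Exact model of
-- CPython's correctly rounded int/int true division on this task's domain.
def pvRN (p q : Int) : Int × Int :=
  if p = 0 then (0, 0)
  else
    let a : Int := |p|
    let sh0 : Int := 53 - ((PySem.Int.bitLength a : Int) - (PySem.Int.bitLength q : Int))
    let t0 := pvRNdiv a q sh0
    let sh := if 2 ^ 53 ≤ t0.1 then sh0 - 1 else sh0
    let t := if 2 ^ 53 ≤ t0.1 then pvRNdiv a q sh else t0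
    let m0 := t.1
    let r := t.2.1
    let d := t.2.2
    let m := if d < 2 * r then m0 + 1
             else if 2 * r = d ∧ Int.emod m0 2 = 1 then m0 + 1 else m0
    (if p < 0 then -m else m, -sh)

-- math.floor of a float (m, e): exact.
def pvFloorD (x : Int × Int) : Int :=
  if 0 ≤ x.2 then x.1 * 2 ^ x.2.toNat else Int.ediv x.1 (2 ^ (-x.2).toNat)

-- Python's  target - count  (float minus int).  count = floor(target) is always exactly
-- representable, so the conversion to float is exact and a single correct rounding of the
-- exact difference models the Python subtraction exactly.
def pvSubD (x : Int × Int) (c : Int) : Int × Int :=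
  if 0 ≤ x.2 then pvRN (x.1 * 2 ^ x.2.toNat - c) 1
  else pvRN (x.1 - c * 2 ^ (-x.2).toNat) (2 ^ (-x.2).toNat)

-- Float comparison x > y: floats compare as the exact rationals they denote.
def pvGtD (x y : Int × Int) : Bool :=
  let e := min x.2 y.2
  y.1 * 2 ^ (y.2 - e).toNat < x.1 * 2 ^ (x.2 - e).toNat

-- _normalize_short_long_ratio (shared by both Pythons): none = the ValueError branch
-- (a 2-tuple always has len 2, so only the positivity check can raise).
def pvNormalize (r : Int × Int) : Option (Int × Int) :=
  if r.1 ≤ 0 ∨ r.2 ≤ 0 then none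
  else
    let g : Int := Int.gcd r.1 r.2
    some (PySem.Int.floordiv r.1 g, PySem.Int.floordiv r.2 g)

-- ===== PORT A =====
-- Literal transliteration of A: normalize, float targets, floors, the 2-element list sorted
-- by (-frac, name) — "short" first iff frac_s > frac_l, a tie puts "long" first — and the
-- alternating distribution loop over range(remaining).
def compute_group_sample_counts_py (prompt_num : Int) (short_long_ratio : Int × Int) : Int × Int :=
  match pvNormalize short_long_ratio with
  | none => (0, 0)  -- Python raises ValueError here; excluded by Pre_
  | some (short_ratio, long_ratio) =>
    let total_ratio := short_ratio + long_ratio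
    let short_target := pvRN (prompt_num * short_ratio) total_ratio
    let long_target := pvRN (prompt_num * long_ratio) total_ratio
    let short_count := pvFloorD short_target
    let long_count := pvFloorD long_target
    let remaining := prompt_num - short_count - long_count
    let fractional_parts : List (String × Int × Int) :=
      if pvGtD (pvSubD short_target short_count) (pvSubD long_target long_count) then
        [("short", pvSubD short_target short_count), ("long", pvSubD long_target long_count)]
      else
        [("long", pvSubD long_target long_count), ("short", pvSubD short_target short_count)]
    (PySem.List.pyRange 0 remaining 1).foldl
      (fun acc idx =>
        match PySem.List.pyGet? fractional_parts (PySem.Int.mod idx 2) with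
        | some item => if item.1 == "short" then (acc.1 + 1, acc.2) else (acc.1, acc.2 + 1)
        | none => acc)  -- unreachable: idx % 2 ∈ {0,1}, the list has length 2
      (short_count, long_count)

-- ===== PORT B =====
-- B's helper _targets: the two float targets, or none where normalization raises.
def pvTargets (prompt_num : Int) (short_long_ratio : Int × Int) :
    Option ((Int × Int) × (Int × Int)) :=
  (pvNormalize short_long_ratio).map (fun sl =>
    (pvRN (prompt_num * sl.1) (sl.1 + sl.2), pvRN (prompt_num * sl.2) (sl.1 + sl.2)))

def compute_group_sample_counts_py_alt (prompt_num : Int) (short_long_ratio : Int × Int) : Int × Int :=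
  match pvTargets prompt_num short_long_ratio with
  | none => (0, 0)  -- Python raises ValueError here; excluded by Pre_
  | some (st, lt) =>
    let base_short := pvFloorD st
    let base_long := pvFloorD lt
    let remaining := prompt_num - base_short - base_long
    if remaining ≤ 0 then (base_short, base_long)
    else
      let lead := PySem.Int.floordiv (remaining + 1) 2
      if pvGtD (pvSubD st base_short) (pvSubD lt base_long) then
        (base_short + lead, base_long + (remaining - lead))
      else
        (base_short + (remaining - lead), base_long + lead)

-- ===== PRECONDITION & SPEC =====
-- Pre_ excludes exactly the inputs where _normalize_short_long_ratio raises ValueError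
-- (a non-positive ratio component); A returns normally everywhere else.
def Pre_compute_group_sample_counts_py (prompt_num : Int) (short_long_ratio : Int × Int) : Prop :=
  0 < short_long_ratio.1 ∧ 0 < short_long_ratio.2
instance (prompt_num : Int) (short_long_ratio : Int × Int) : Decidable (Pre_compute_group_sample_counts_py prompt_num short_long_ratio) := by unfold Pre_compute_group_sample_counts_py; infer_instance

def pvWitness_compute_group_sample_counts_py : Int × (Int × Int) := (10, (1, 2))

def Spec_compute_group_sample_counts_py (prompt_num : Int) (short_long_ratio : Int × Int) (out : Int × Int) : Prop := out = compute_group_sample_counts_py_alt prompt_num short_long_ratio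
instance (prompt_num : Int) (short_long_ratio : Int × Int) (out : Int × Int) : Decidable (Spec_compute_group_sample_counts_py prompt_num short_long_ratio out) := by unfold Spec_compute_group_sample_counts_py; infer_instance

-- ===== CLAIM (what is proved, stated in full; the proofs are below) =====
def Claim_equal_compute_group_sample_counts_py : Prop := ∀ (prompt_num : Int) (short_long_ratio : Int × Int), Dom_compute_group_sample_counts_py prompt_num short_long_ratio → Pre_compute_group_sample_counts_py prompt_num short_long_ratio → Spec_compute_group_sample_counts_py prompt_num short_long_ratio (compute_group_sample_counts_py prompt_num short_long_ratio)

-- ===== LEMMAS AND PROOFS =====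

-- A's distribution loop when "short" leads: evens go to short, odds to long.
lemma pvLoop_short (x y : Int × Int) (n : Nat) (sc lc : Int) :
    (PySem.List.pyRange 0 (n : Int) 1).foldl
      (fun acc idx =>
        match PySem.List.pyGet? [("short", x), ("long", y)] (PySem.Int.mod idx 2) with
        | some item => if item.1 == "short" then (acc.1 + 1, acc.2) else (acc.1, acc.2 + 1)
        | none => acc)
      (sc, lc)
    = (sc + ((n + 1) / 2 : Nat), lc + (n / 2 : Nat)) := by
  induction n with
  | zero => simp [PySem.List.pyRange_one_eq_nil]
  | succ k ih =>
    rw [show ((k + 1 : Nat) : Int) = (k : Int) + 1 by push_cast; ring,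
        PySem.List.pyRange_one_succ_right (by positivity), List.foldl_append, ih]
    have hm : PySem.Int.mod (k : Int) 2 = ((k % 2 : Nat) : Int) := by
      exact_mod_cast PySem.Int.mod_natCast k 2
    simp only [List.foldl_cons, List.foldl_nil, hm, PySem.List.pyGet?_natCast]
    by_cases h : k % 2 = 0
    · rw [h]
      simp [Prod.mk.injEq]; omega
    · have h1 : k % 2 = 1 := by omega
      rw [h1]
      simp [Prod.mk.injEq]; omega

-- A's distribution loop when "long" leads: evens go to long, odds to short.
lemma pvLoop_long (x y : Int × Int) (n : Nat) (sc lc : Int) :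
    (PySem.List.pyRange 0 (n : Int) 1).foldl
      (fun acc idx =>
        match PySem.List.pyGet? [("long", y), ("short", x)] (PySem.Int.mod idx 2) with
        | some item => if item.1 == "short" then (acc.1 + 1, acc.2) else (acc.1, acc.2 + 1)
        | none => acc)
      (sc, lc)
    = (sc + (n / 2 : Nat), lc + ((n + 1) / 2 : Nat)) := by
  induction n with
  | zero => simp [PySem.List.pyRange_one_eq_nil]
  | succ k ih =>
    rw [show ((k + 1 : Nat) : Int) = (k : Int) + 1 by push_cast; ring,
        PySem.List.pyRange_one_succ_right (by positivity), List.foldl_append, ih]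
    have hm : PySem.Int.mod (k : Int) 2 = ((k % 2 : Nat) : Int) := by
      exact_mod_cast PySem.Int.mod_natCast k 2
    simp only [List.foldl_cons, List.foldl_nil, hm, PySem.List.pyGet?_natCast]
    by_cases h : k % 2 = 0
    · rw [h]
      simp [Prod.mk.injEq]; omega
    · have h1 : k % 2 = 1 := by omega
      rw [h1]
      simp [Prod.mk.injEq]; omega

-- ===== VERDICT (by name: the statement is the Claim_ definition above) =====
theorem compute_group_sample_counts_py_spec : Claim_equal_compute_group_sample_counts_py := by
  intro p r _dom _pre
  unfold Spec_compute_group_sample_counts_py compute_group_sample_counts_py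
    compute_group_sample_counts_py_alt pvTargets
  cases h : pvNormalize r with
  | none => rfl
  | some sl =>
    obtain ⟨s, l⟩ := sl
    simp only [Option.map_some]
    set st := pvRN (p * s) (s + l) with hst
    set lt := pvRN (p * l) (s + l) with hlt
    set sc := pvFloorD st with hsc
    set lc := pvFloorD lt with hlc
    set rem := p - sc - lc with hrem2
    by_cases hrem : rem ≤ 0
    · rw [if_pos hrem, PySem.List.pyRange_one_eq_nil hrem, List.foldl_nil]
    · rw [if_neg hrem]
      set n := rem.toNat with hn2
      have hrn : rem = (n : Int) := by omega
      have hdiv : PySem.Int.floordiv (rem + 1) 2 = (((n + 1) / 2 : Nat) : Int) := by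
        rw [PySem.Int.floordiv_eq_ediv_of_pos (by omega : (0 : Int) < 2)]
        omega
      by_cases hg : pvGtD (pvSubD st sc) (pvSubD lt lc)
      · rw [if_pos hg, if_pos hg, hdiv, hrn,
            pvLoop_short (pvSubD st sc) (pvSubD lt lc) n sc lc]
        rw [Prod.mk.injEq]
        exact ⟨rfl, by omega⟩
      · rw [if_neg hg, if_neg hg, hdiv, hrn,
            pvLoop_long (pvSubD st sc) (pvSubD lt lc) n sc lc]
        rw [Prod.mk.injEq]
        exact ⟨by omega, rfl⟩
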